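-- pv_equiv track=rewrite | github.com/sriramrokkam/scb_pa_final | scripts/Dublin_Core/content_scanner.py | get_primary_classification
-- ===== SOURCE A (Python) =====
-- import typing
--
-- def get_primary_classification(keywords_found: typing.List[str]) -> str:
--     """Same function - no changes needed"""
--     if not keywords_found:
--         return ""
--
--     hierarchy = ["RESTRICTED", "CONFIDENTIAL", "CROSS BORDER", "INTERNAL", "PUBLIC"]
--
--     for classification in hierarchy:
--         if classification in keywords_found:
--             return classification
--
--     return keywords_found[0]
-- ===== SOURCE B (Python) =====
-- import typing
--
-- def get_primary_classification(keywords_found: typing.List[str]) -> str: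
--     if not keywords_found:
--         return ""
--     hierarchy = ["RESTRICTED", "CONFIDENTIAL", "CROSS BORDER", "INTERNAL", "PUBLIC"]
--     rank = {kw: i for i, kw in enumerate(hierarchy)}
--     best = None  # (rank, keyword) with the smallest rank seen so far
--     for kw in keywords_found:
--         r = rank.get(kw)
--         if r is not None and (best is None or r < best[0]):
--             best = (r, kw)
--     return best[1] if best is not None else keywords_found[0]
-- ===== Notes on version B (the rewrite author's own statement) =====
-- stated objective: alternative
-- what changed: Instead of up to five membership scans over the hierarchy, B builds a keyword-to-rank dict once and makes a single pass over keywords_found keeping the minimum-rank hierarchy keyword, falling back to keywords_found[0].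
import Mathlib
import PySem

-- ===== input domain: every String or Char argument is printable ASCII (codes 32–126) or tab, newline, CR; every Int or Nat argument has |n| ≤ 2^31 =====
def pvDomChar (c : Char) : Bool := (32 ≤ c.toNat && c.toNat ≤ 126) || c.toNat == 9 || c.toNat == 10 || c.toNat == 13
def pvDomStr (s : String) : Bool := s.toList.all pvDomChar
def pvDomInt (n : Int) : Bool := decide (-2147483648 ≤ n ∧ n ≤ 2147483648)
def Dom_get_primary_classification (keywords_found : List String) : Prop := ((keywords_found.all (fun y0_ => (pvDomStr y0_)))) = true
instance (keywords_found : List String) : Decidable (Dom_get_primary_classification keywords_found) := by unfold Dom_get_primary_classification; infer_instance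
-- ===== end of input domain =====

-- B replaces A's five membership scans over the hierarchy by one pass over the
-- input keeping the minimum-rank hierarchy keyword (rank from a dict built once);
-- objective: alternative (different algorithm, same result).

-- ===== PORT A =====
def pvHierarchyA : List String := ["RESTRICTED", "CONFIDENTIAL", "CROSS BORDER", "INTERNAL", "PUBLIC"]

-- A's `for classification in hierarchy: if classification in keywords_found: return classification`
def pvLoopA : List String → List String → Option String
  | [], _ => none
  | c :: rest, xs => if xs.contains c then some c else pvLoopA rest xs

def get_primary_classification (keywords_found : List String) : String :=
  match keywords_found with
  | [] => ""                                   -- `if not keywords_found: return ""`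
  | x :: _ =>
    match pvLoopA pvHierarchyA keywords_found with
    | some c => c
    | none => x                                -- `return keywords_found[0]` (list known nonempty)

-- ===== PORT B =====
def pvHierarchyB : List String := ["RESTRICTED", "CONFIDENTIAL", "CROSS BORDER", "INTERNAL", "PUBLIC"]

-- `rank = {kw: i for i, kw in enumerate(hierarchy)}`
def pvRankB : PySem.Dict String Int :=
  PySem.Dict.ofList ((PySem.List.enumerate pvHierarchyB).map (fun p => (p.2, p.1)))

-- loop body: `r = rank.get(kw); if r is not None and (best is None or r < best[0]): best = (r, kw)`
def pvStepB (best : Option (Int × String)) (kw : String) : Option (Int × String) :=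
  match pvRankB.get? kw with
  | none => best
  | some r =>
    match best with
    | none => some (r, kw)
    | some p => if r < p.1 then some (r, kw) else best

def get_primary_classification_alt (keywords_found : List String) : String :=
  match keywords_found with
  | [] => ""
  | x :: _ =>
    match keywords_found.foldl pvStepB none with
    | some p => p.2                            -- `return best[1]`
    | none => x                                -- `else keywords_found[0]`

-- ===== PRECONDITION & SPEC =====
def Spec_get_primary_classification (keywords_found : List String) (out : String) : Prop := out = get_primary_classification_alt keywords_found
instance (keywords_found : List String) (out : String) : Decidable (Spec_get_primary_classification keywords_found out) := by unfold Spec_get_primary_classification; infer_instance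

-- ===== CLAIM (what is proved, stated in full; the proofs are below) =====
def Claim_equal_get_primary_classification : Prop := ∀ (keywords_found : List String), Dom_get_primary_classification keywords_found → Spec_get_primary_classification keywords_found (get_primary_classification keywords_found)

-- ===== LEMMAS AND PROOFS =====

-- closed form of the rank dict lookup
def rnk (s : String) : Option Int :=
  if "RESTRICTED" = s then some 0
  else if "CONFIDENTIAL" = s then some 1
  else if "CROSS BORDER" = s then some 2
  else if "INTERNAL" = s then some 3
  else if "PUBLIC" = s then some 4
  else none

lemma pvRankB_mk : pvRankB = PySem.Dict.mk
    [("RESTRICTED", (0:Int)), ("CONFIDENTIAL", 1), ("CROSS BORDER", 2), ("INTERNAL", 3), ("PUBLIC", 4)] := by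
  decide

lemma rank_eq (s : String) : pvRankB.get? s = rnk s := by
  rw [pvRankB_mk]
  unfold rnk
  split_ifs with h1 h2 h3 h4 h5
  · subst h1; decide
  · subst h2; decide
  · subst h3; decide
  · subst h4; decide
  · subst h5; decide
  · have e1 : ("RESTRICTED" == s) = false := beq_eq_false_iff_ne.mpr h1
    have e2 : ("CONFIDENTIAL" == s) = false := beq_eq_false_iff_ne.mpr h2
    have e3 : ("CROSS BORDER" == s) = false := beq_eq_false_iff_ne.mpr h3
    have e4 : ("INTERNAL" == s) = false := beq_eq_false_iff_ne.mpr h4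
    have e5 : ("PUBLIC" == s) = false := beq_eq_false_iff_ne.mpr h5
    simp [PySem.Dict.get?, List.find?, e1, e2, e3, e4, e5]

lemma rnk_inv (s : String) (k : Int) (h : rnk s = some k) :
    (s = "RESTRICTED" ∧ k = 0) ∨ (s = "CONFIDENTIAL" ∧ k = 1) ∨ (s = "CROSS BORDER" ∧ k = 2) ∨
    (s = "INTERNAL" ∧ k = 3) ∨ (s = "PUBLIC" ∧ k = 4) := by
  unfold rnk at h
  split_ifs at h with h1 h2 h3 h4 h5 <;> simp_all [eq_comm]

lemma rnk_det (a b : String) (k : Int) (ha : rnk a = some k) (hb : rnk b = some k) : a = b := by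
  rcases rnk_inv a k ha with ⟨ea, ka⟩ | ⟨ea, ka⟩ | ⟨ea, ka⟩ | ⟨ea, ka⟩ | ⟨ea, ka⟩ <;>
    rcases rnk_inv b k hb with ⟨eb, kb⟩ | ⟨eb, kb⟩ | ⟨eb, kb⟩ | ⟨eb, kb⟩ | ⟨eb, kb⟩ <;>
    (try omega) <;> simp_all

lemma stepB_none (b : Option (Int × String)) (kw : String) (h : rnk kw = none) :
    pvStepB b kw = b := by
  unfold pvStepB; rw [rank_eq, h]

lemma stepB_some_none (kw : String) (r : Int) (h : rnk kw = some r) :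
    pvStepB none kw = some (r, kw) := by
  unfold pvStepB; rw [rank_eq, h]

lemma stepB_some_some (kw : String) (r : Int) (q : Int × String) (h : rnk kw = some r) :
    pvStepB (some q) kw = if r < q.1 then some (r, kw) else some q := by
  unfold pvStepB; rw [rank_eq, h]

lemma fold_none (xs : List String) (b : Option (Int × String))
    (h : ∀ x ∈ xs, rnk x = none) : xs.foldl pvStepB b = b := by
  induction xs generalizing b with
  | nil => rfl
  | cons x xs ih =>
    rw [List.foldl_cons, stepB_none b x (h x (by simp))]
    exact ih b (fun y hy => h y (by simp [hy]))

lemma fold_exists (xs : List String) (b : Option (Int × String)) (p : Int × String)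
    (h : xs.foldl pvStepB b = some p) :
    b = some p ∨ (rnk p.2 = some p.1 ∧ p.2 ∈ xs) := by
  induction xs generalizing b with
  | nil => exact Or.inl h
  | cons x xs ih =>
    rw [List.foldl_cons] at h
    rcases hrx : rnk x with _ | r
    · rw [stepB_none b x hrx] at h
      rcases ih b h with hb | ⟨hr, hm⟩
      · exact Or.inl hb
      · exact Or.inr ⟨hr, by simp [hm]⟩
    · rcases b with _ | q
      · rw [stepB_some_none x r hrx] at h
        rcases ih _ h with hb | ⟨hr, hm⟩
        · obtain rfl : (r, x) = p := by simpa using hb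
          exact Or.inr ⟨hrx, by simp⟩
        · exact Or.inr ⟨hr, by simp [hm]⟩
      · rw [stepB_some_some x r q hrx] at h
        by_cases hlt : r < q.1
        · rw [if_pos hlt] at h
          rcases ih _ h with hb | ⟨hr, hm⟩
          · obtain rfl : (r, x) = p := by simpa using hb
            exact Or.inr ⟨hrx, by simp⟩
          · exact Or.inr ⟨hr, by simp [hm]⟩
        · rw [if_neg hlt] at h
          rcases ih _ h with hb | ⟨hr, hm⟩
          · exact Or.inl hb
          · exact Or.inr ⟨hr, by simp [hm]⟩

lemma fold_mono (xs : List String) (q : Int × String) :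
    ∃ p, xs.foldl pvStepB (some q) = some p ∧ p.1 ≤ q.1 := by
  induction xs generalizing q with
  | nil => exact ⟨q, rfl, le_refl _⟩
  | cons x xs ih =>
    rcases hrx : rnk x with _ | r
    · rw [List.foldl_cons, stepB_none (some q) x hrx]
      exact ih q
    · rw [List.foldl_cons, stepB_some_some x r q hrx]
      by_cases hlt : r < q.1
      · rw [if_pos hlt]
        obtain ⟨p, hp, hle⟩ := ih (r, x)
        exact ⟨p, hp, le_trans hle (le_of_lt hlt)⟩
      · rw [if_neg hlt]
        exact ih q

lemma fold_min (xs : List String) (b : Option (Int × String)) (w : String) (i : Int)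
    (hw : rnk w = some i) (hm : w ∈ xs) :
    ∃ p, xs.foldl pvStepB b = some p ∧ p.1 ≤ i := by
  induction xs generalizing b with
  | nil => simp at hm
  | cons x xs ih =>
    rw [List.foldl_cons]
    rcases List.mem_cons.mp hm with rfl | hm'
    · have hx : ∃ q, pvStepB b w = some q ∧ q.1 ≤ i := by
        rcases b with _ | q
        · exact ⟨(i, w), stepB_some_none w i hw, le_refl _⟩
        · rw [stepB_some_some w i q hw]
          by_cases hlt : i < q.1
          · rw [if_pos hlt]; exact ⟨(i, w), rfl, le_refl _⟩
          · rw [if_neg hlt]; exact ⟨q, rfl, by omega⟩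
      obtain ⟨q, hq, hqi⟩ := hx
      rw [hq]
      obtain ⟨p, hp, hle⟩ := fold_mono xs q
      exact ⟨p, hp, le_trans hle hqi⟩
    · exact ih (pvStepB b x) hm'

lemma fold_char (xs : List String) (w : String) (i : Int)
    (hw : rnk w = some i) (hm : w ∈ xs)
    (hmin : ∀ y ∈ xs, ∀ k, rnk y = some k → i ≤ k) :
    xs.foldl pvStepB none = some (i, w) := by
  obtain ⟨p, hp, hle⟩ := fold_min xs none w i hw hm
  rcases fold_exists xs none p hp with h | ⟨hr, hmem⟩
  · simp at h
  · have hge : i ≤ p.1 := hmin p.2 hmem p.1 hr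
    have hpi : p.1 = i := le_antisymm hle hge
    have : p.2 = w := rnk_det p.2 w i (hpi ▸ hr) hw
    rw [hp]
    rcases p with ⟨pi, ps⟩
    simp_all

-- main equivalence on a (nonempty) list, by cases on which hierarchy words occur
lemma main_eq (xs : List String) :
    get_primary_classification xs = get_primary_classification_alt xs := by
  rcases xs with _ | ⟨x, rest⟩
  · rfl
  · set xs := x :: rest with hxs
    unfold get_primary_classification get_primary_classification_alt
    simp only [pvLoopA, pvHierarchyA]
    have hc : ∀ s : String, xs.contains s = true ↔ s ∈ xs := by
      intro s; exact List.contains_iff_mem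
    by_cases h0 : "RESTRICTED" ∈ xs
    · rw [if_pos ((hc _).mpr h0)]
      rw [fold_char xs "RESTRICTED" 0 (by decide) h0 ?_]
      intro y hy k hk
      rcases rnk_inv y k hk with ⟨_, rfl⟩ | ⟨_, rfl⟩ | ⟨_, rfl⟩ | ⟨_, rfl⟩ | ⟨_, rfl⟩ <;> omega
    · rw [if_neg (by simp [h0])]
      by_cases h1 : "CONFIDENTIAL" ∈ xs
      · rw [if_pos ((hc _).mpr h1)]
        rw [fold_char xs "CONFIDENTIAL" 1 (by decide) h1 ?_]
        intro y hy k hk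
        rcases rnk_inv y k hk with ⟨rfl, rfl⟩ | ⟨_, rfl⟩ | ⟨_, rfl⟩ | ⟨_, rfl⟩ | ⟨_, rfl⟩
        · exact absurd hy h0
        all_goals omega
      · rw [if_neg (by simp [h1])]
        by_cases h2 : "CROSS BORDER" ∈ xs
        · rw [if_pos ((hc _).mpr h2)]
          rw [fold_char xs "CROSS BORDER" 2 (by decide) h2 ?_]
          intro y hy k hk
          rcases rnk_inv y k hk with ⟨rfl, rfl⟩ | ⟨rfl, rfl⟩ | ⟨_, rfl⟩ | ⟨_, rfl⟩ | ⟨_, rfl⟩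
          · exact absurd hy h0
          · exact absurd hy h1
          all_goals omega
        · rw [if_neg (by simp [h2])]
          by_cases h3 : "INTERNAL" ∈ xs
          · rw [if_pos ((hc _).mpr h3)]
            rw [fold_char xs "INTERNAL" 3 (by decide) h3 ?_]
            intro y hy k hk
            rcases rnk_inv y k hk with ⟨rfl, rfl⟩ | ⟨rfl, rfl⟩ | ⟨rfl, rfl⟩ | ⟨_, rfl⟩ | ⟨_, rfl⟩
            · exact absurd hy h0
            · exact absurd hy h1
            · exact absurd hy h2
            all_goals omega
          · rw [if_neg (by simp [h3])]
            by_cases h4 : "PUBLIC" ∈ xs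
            · rw [if_pos ((hc _).mpr h4)]
              rw [fold_char xs "PUBLIC" 4 (by decide) h4 ?_]
              intro y hy k hk
              rcases rnk_inv y k hk with ⟨rfl, rfl⟩ | ⟨rfl, rfl⟩ | ⟨rfl, rfl⟩ | ⟨rfl, rfl⟩ | ⟨_, rfl⟩
              · exact absurd hy h0
              · exact absurd hy h1
              · exact absurd hy h2
              · exact absurd hy h3
              · omega
            · rw [if_neg (by simp [h4])]
              rw [fold_none xs none ?_]
              intro y hy
              by_contra hne
              rcases hr : rnk y with _ | k
              · exact hne hr
              · rcases rnk_inv y k hr with ⟨rfl, _⟩ | ⟨rfl, _⟩ | ⟨rfl, _⟩ | ⟨rfl, _⟩ | ⟨rfl, _⟩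
                · exact h0 hy
                · exact h1 hy
                · exact h2 hy
                · exact h3 hy
                · exact h4 hy

-- ===== VERDICT (by name: the statement is the Claim_ definition above) =====
theorem get_primary_classification_spec : Claim_equal_get_primary_classification := by
  intro xs _
  unfold Spec_get_primary_classification
  exact main_eq xs
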